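-- pv_equiv track=rewrite | github.com/NadimGhaznavi/ai_hydra | ai_hydra/nnet/ATH/ATHCommon.py | build_chunk_ranges
-- ===== SOURCE A (Python) =====
-- def build_chunk_ranges(
--     ep_size: int, seq_length: int
-- ) -> tuple[tuple[int, int], ...]:
--     if not isinstance(ep_size, int):
--         raise TypeError(f"ep_size must be int, got {type(ep_size).__name__}")
--     if not isinstance(seq_length, int):
--         raise TypeError(
--             f"seq_length must be int, got {type(seq_length).__name__}"
--         )
--
--     if ep_size < 0:
--         raise ValueError(f"ep_size must be >= 0, got {ep_size}")
--     if seq_length < 1: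
--         raise ValueError(f"seq_length must be >= 1, got {seq_length}")
--
--     num_chunks = ep_size // seq_length
--     rem = ep_size % seq_length
--
--     ranges: list[tuple[int, int]] = []
--     for chunk_idx in range(num_chunks):
--         start = rem + (chunk_idx * seq_length)
--         end = start + seq_length
--         ranges.append((start, end))
--
--     return tuple(ranges)
-- ===== SOURCE B (Python) =====
-- def build_chunk_ranges(
--     ep_size: int, seq_length: int
-- ) -> tuple[tuple[int, int], ...]:
--     if not isinstance(ep_size, int):
--         raise TypeError(f"ep_size must be int, got {type(ep_size).__name__}")
--     if not isinstance(seq_length, int):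
--         raise TypeError(
--             f"seq_length must be int, got {type(seq_length).__name__}"
--         )
--     if ep_size < 0:
--         raise ValueError(f"ep_size must be >= 0, got {ep_size}")
--     if seq_length < 1:
--         raise ValueError(f"seq_length must be >= 1, got {seq_length}")
--
--     rem = ep_size % seq_length
--     bounds = list(range(rem, ep_size + 1, seq_length))
--     return tuple(zip(bounds, bounds[1:]))
-- ===== Notes on version B (the rewrite author's own statement) =====
-- stated objective: alternative
-- what changed: Instead of a loop over chunk indices computing each (start,end) pair by multiplication, B materializes the boundary points range(rem, ep_size+1, seq_length) once and pairs adjacent boundaries with zip(bounds, bounds[1:]).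
import Mathlib
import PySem

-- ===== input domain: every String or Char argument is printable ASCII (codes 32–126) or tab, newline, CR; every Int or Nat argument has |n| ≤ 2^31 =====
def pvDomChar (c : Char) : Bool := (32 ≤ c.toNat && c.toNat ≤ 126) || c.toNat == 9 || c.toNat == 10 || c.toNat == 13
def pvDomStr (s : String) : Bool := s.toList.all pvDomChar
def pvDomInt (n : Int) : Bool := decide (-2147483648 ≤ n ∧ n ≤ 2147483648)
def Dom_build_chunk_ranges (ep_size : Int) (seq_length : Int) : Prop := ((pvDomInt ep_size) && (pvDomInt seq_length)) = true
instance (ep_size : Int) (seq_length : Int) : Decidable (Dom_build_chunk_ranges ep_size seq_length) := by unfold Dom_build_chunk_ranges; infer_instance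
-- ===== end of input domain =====

-- B replaces A's index loop by a boundary table range(rem, ep_size+1, seq_length) paired
-- with zip(bounds, bounds[1:]); same cost, different decomposition (objective: alternative).


-- ===== PORT A =====
def build_chunk_ranges (ep_size : Int) (seq_length : Int) : List (Int × Int) :=
  let num_chunks := PySem.Int.floordiv ep_size seq_length
  let rem := PySem.Int.mod ep_size seq_length
  (PySem.List.pyRange 0 num_chunks 1).foldl
    (fun ranges chunk_idx =>
      let start := rem + chunk_idx * seq_length
      let «end» := start + seq_length
      ranges ++ [(start, «end»)]) []

-- ===== PORT B =====
def build_chunk_ranges_alt (ep_size : Int) (seq_length : Int) : List (Int × Int) :=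
  let rem := PySem.Int.mod ep_size seq_length
  let bounds := PySem.List.pyRange rem (ep_size + 1) seq_length
  bounds.zip bounds.tail

-- ===== PRECONDITION & SPEC =====
-- Pre_ excludes exactly the inputs on which A raises (ValueError: ep_size < 0 or seq_length < 1).
def Pre_build_chunk_ranges (ep_size : Int) (seq_length : Int) : Prop :=
  0 ≤ ep_size ∧ 1 ≤ seq_length
instance (ep_size : Int) (seq_length : Int) : Decidable (Pre_build_chunk_ranges ep_size seq_length) := by unfold Pre_build_chunk_ranges; infer_instance
def pvWitness_build_chunk_ranges : Int × Int := (10, 3)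

def Spec_build_chunk_ranges (ep_size : Int) (seq_length : Int) (out : List (Int × Int)) : Prop := out = build_chunk_ranges_alt ep_size seq_length
instance (ep_size : Int) (seq_length : Int) (out : List (Int × Int)) : Decidable (Spec_build_chunk_ranges ep_size seq_length out) := by unfold Spec_build_chunk_ranges; infer_instance

-- ===== CLAIM (what is proved, stated in full; the proofs are below) =====
def Claim_equal_build_chunk_ranges : Prop := ∀ (ep_size : Int) (seq_length : Int), Dom_build_chunk_ranges ep_size seq_length → Pre_build_chunk_ranges ep_size seq_length → Spec_build_chunk_ranges ep_size seq_length (build_chunk_ranges ep_size seq_length)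

-- ===== LEMMAS AND PROOFS =====

-- A's append-accumulating loop is map.
theorem foldl_append_singleton {α β : Type} (f : α → β) :
    ∀ (l : List α) (acc : List β),
      l.foldl (fun a x => a ++ [f x]) acc = acc ++ l.map f := by
  intro l
  induction l with
  | nil => intro acc; simp
  | cons x xs ih => intro acc; simp [List.foldl, ih, List.append_assoc]

-- pairing a boundary table with its tail
theorem zip_range_succ_tail {α : Type} (f : Nat → α) (m : Nat) :
    ((List.range (m + 1)).map f).zip (((List.range (m + 1)).map f).tail)
      = (List.range m).map (fun k => (f k, f (k + 1))) := by
  have htail : ((List.range (m + 1)).map f).tail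
      = (List.range m).map (fun k => f (k + 1)) := by
    rw [List.range_succ_eq_map]
    simp [Function.comp]
  have hhead : (List.range (m + 1)).map f = (List.range m).map f ++ [f m] := by
    rw [List.range_succ]; simp
  rw [htail, hhead]
  have hlen : ((List.range m).map f).length = ((List.range m).map (fun k => f (k + 1))).length := by
    simp
  rw [show ((List.range m).map (fun k => f (k + 1)))
        = (List.range m).map (fun k => f (k + 1)) ++ ([] : List α) by simp,
      List.zip_append hlen]
  simp [List.zip_map']

theorem build_chunk_ranges_eq (e s : Int) (he : 0 ≤ e) (hs : 1 ≤ s) :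
    build_chunk_ranges e s = build_chunk_ranges_alt e s := by
  have hspos : 0 < s := by omega
  have hfd : PySem.Int.floordiv e s = e / s := PySem.Int.floordiv_eq_ediv_of_pos hspos
  have hmd : PySem.Int.mod e s = e % s := PySem.Int.mod_eq_emod_of_pos hspos
  set n : Int := e / s with hn
  set r : Int := e % s with hr
  have hdm : s * n + r = e := by have h := Int.emod_add_ediv e s; linarith
  have hr0 : 0 ≤ r := Int.emod_nonneg e (by omega)
  have hrs : r < s := Int.emod_lt_of_pos e hspos
  have hn0 : 0 ≤ n := Int.ediv_nonneg he (by omega)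
  -- A-side: loop = map over range
  have hA : build_chunk_ranges e s
      = (List.range n.toNat).map (fun (k : Nat) => (r + (k : Int) * s, r + (k : Int) * s + s)) := by
    unfold build_chunk_ranges
    dsimp only
    rw [hfd, hmd, PySem.List.pyRange_one]
    simp only [Int.sub_zero]
    rw [List.foldl_map, foldl_append_singleton]
    simp only [List.nil_append]
    apply List.map_congr_left
    intro k _
    simp
  -- B-side: boundary table has n.toNat + 1 points, then pair adjacent entries
  have hB : build_chunk_ranges_alt e s
      = (List.range n.toNat).map (fun (k : Nat) => (r + s * (k : Int), r + s * ((k : Int) + 1))) := by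
    unfold build_chunk_ranges_alt
    dsimp only
    rw [hmd]
    have hcnt : PySem.List.pyRange r (e + 1) s
        = (List.range (n.toNat + 1)).map (fun (k : Nat) => r + s * (k : Int)) := by
      rw [PySem.List.pyRange_of_pos _ _ hspos]
      have hlt : r < e + 1 := by
        have hsn : 0 ≤ s * n := mul_nonneg (by omega) hn0
        omega
      rw [if_pos hlt]
      have h1 : (e + 1 - r + s - 1) / s = n + 1 := by
        have hx : e + 1 - r + s - 1 = s * (n + 1) := by linarith
        rw [hx, Int.mul_ediv_cancel_left _ (by omega)]
      rw [h1]
      have h2 : (n + 1).toNat = n.toNat + 1 := by omega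
      rw [h2]
    rw [hcnt, zip_range_succ_tail (fun (k : Nat) => r + s * (k : Int)) n.toNat]
    apply List.map_congr_left
    intro k _
    push_cast
    ring_nf
  rw [hA, hB]
  apply List.map_congr_left
  intro k _
  simp only [Prod.mk.injEq]
  constructor <;> ring

-- ===== VERDICT (by name: the statement is the Claim_ definition above) =====
theorem build_chunk_ranges_spec : Claim_equal_build_chunk_ranges := by
  intro e s _ hpre
  exact build_chunk_ranges_eq e s hpre.1 hpre.2
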